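-- pv_equiv track=rewrite | github.com/jpw142/CS111-Coursework | ps2/ps2pr5.py | process
-- ===== SOURCE A (Python) =====
-- def process(vals):
--     """ for value in vals if it's odd square it if it's even don't do anything"""
--     if len(vals) == 0:
--         return []
--     rest_process = process(vals[1:])
--     if vals[0] % 2 == 1:
--         return [vals[0] ** 2] + rest_process
--     else:
--         return [vals[0]] + rest_process
-- ===== SOURCE B (Python) =====
-- def process(vals):
--     result = []
--     for v in vals:
--         if v % 2 == 1:
--             result.append(v ** 2)
--         else:
--             result.append(v)
--     return result
-- ===== Notes on version B (the rewrite author's own statement) =====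
-- stated objective: faster
-- what changed: Replaces A's head/tail recursion (which rebuilds a slice vals[1:] and concatenates singleton lists at every step, O(n^2) and recursion-depth n) with a single forward loop appending to an accumulator.
import Mathlib
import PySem

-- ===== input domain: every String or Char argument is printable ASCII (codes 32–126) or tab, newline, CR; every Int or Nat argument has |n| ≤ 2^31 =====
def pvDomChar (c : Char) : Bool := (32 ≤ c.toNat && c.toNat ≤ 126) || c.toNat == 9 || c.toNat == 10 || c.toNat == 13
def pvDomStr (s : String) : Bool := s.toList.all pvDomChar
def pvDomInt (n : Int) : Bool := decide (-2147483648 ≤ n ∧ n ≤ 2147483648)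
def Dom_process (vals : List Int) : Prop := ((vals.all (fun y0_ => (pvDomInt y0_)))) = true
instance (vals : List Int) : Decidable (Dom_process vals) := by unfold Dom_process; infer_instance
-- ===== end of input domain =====

-- ===== PORT A =====
def process (vals : List Int) : List Int :=
  match vals with
  | [] => []
  | v :: rest =>
    let rest_process := process rest
    if PySem.Int.mod v 2 == 1 then (v ^ 2) :: rest_process
    else v :: rest_process

-- ===== PORT B =====
def process_alt (vals : List Int) : List Int :=
  vals.foldl (fun result v =>
    if PySem.Int.mod v 2 == 1 then result ++ [v ^ 2] else result ++ [v]) []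

-- ===== PRECONDITION & SPEC =====
def Spec_process (vals : List Int) (out : List Int) : Prop := out = process_alt vals
instance (vals : List Int) (out : List Int) : Decidable (Spec_process vals out) := by unfold Spec_process; infer_instance

-- ===== CLAIM (what is proved, stated in full; the proofs are below) =====
def Claim_equal_process : Prop := ∀ (vals : List Int), Dom_process vals → Spec_process vals (process vals)

-- ===== LEMMAS AND PROOFS =====

-- ===== VERDICT (by name: the statement is the Claim_ definition above) =====
theorem alt_acc (vals : List Int) (acc : List Int) :
    vals.foldl (fun result v =>
      if PySem.Int.mod v 2 == 1 then result ++ [v ^ 2] else result ++ [v]) acc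
      = acc ++ process vals := by
  induction vals generalizing acc with
  | nil => simp [process]
  | cons v rest ih =>
    simp only [List.foldl, process]
    rw [ih]
    split <;> simp

theorem process_spec : Claim_equal_process := by
  intro vals _
  unfold Spec_process process_alt
  simpa using (alt_acc vals []).symm
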